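-- pv_equiv track=rewrite | github.com/anaungurean/Calcul-Numeric | Tema_5/bonus.py | get_pos_for_max
-- ===== SOURCE A (Python) =====
-- def pos_to_indices(pos):
--     i = 0
--     while pos >= i:
--         pos -= i
--         i += 1
--     return i - 1, pos
--
-- def get_pos_for_max(vector_matrix, size_matrix):
--     maxi = abs(vector_matrix[1])
--     pos_maxi_i = 1
--     pos_maxi_j = 0
--     for i in range(3, len(vector_matrix)):
--         if abs(vector_matrix[i]) > maxi:
--             pos_i, pos_j = pos_to_indices(i)
--             if pos_i != pos_j:
--                 maxi = abs(vector_matrix[i])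
--                 pos_maxi_i = pos_i
--                 pos_maxi_j = pos_j
--     return pos_maxi_i, pos_maxi_j
-- ===== SOURCE B (Python) =====
-- def get_pos_for_max(vector_matrix, size_matrix):
--     L = len(vector_matrix)
--     best = abs(vector_matrix[1])
--     bi, bj = 1, 0
--     r = 1
--     while r * (r + 1) // 2 < L:
--         base = r * (r + 1) // 2
--         for j in range(min(r, L - base)):
--             x = abs(vector_matrix[base + j])
--             if x > best:
--                 best = x
--                 bi, bj = r, j
--         r += 1
--     return bi, bj
-- ===== Notes on version B (the rewrite author's own statement) =====
-- stated objective: alternative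
-- what changed: B replaces A's flat scan (which decodes every candidate index with the pos_to_indices subtraction loop) by a while-loop over rows that generates the packed off-diagonal offsets directly (base = r*(r+1)//2 + j) and stops at the array end, so diagonal entries are never visited and no decoding ever happens.
import Mathlib
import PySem

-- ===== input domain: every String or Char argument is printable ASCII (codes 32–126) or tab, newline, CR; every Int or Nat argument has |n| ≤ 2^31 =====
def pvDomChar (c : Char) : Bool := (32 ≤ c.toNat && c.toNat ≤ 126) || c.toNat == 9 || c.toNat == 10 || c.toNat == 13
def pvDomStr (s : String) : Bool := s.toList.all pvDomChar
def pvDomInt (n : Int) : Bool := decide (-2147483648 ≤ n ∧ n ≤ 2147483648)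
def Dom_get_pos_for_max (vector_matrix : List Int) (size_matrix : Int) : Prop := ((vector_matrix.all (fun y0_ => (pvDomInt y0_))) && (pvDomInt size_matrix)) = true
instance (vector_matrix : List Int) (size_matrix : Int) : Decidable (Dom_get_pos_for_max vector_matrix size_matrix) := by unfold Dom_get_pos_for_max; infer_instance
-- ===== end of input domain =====

-- B generates the packed off-diagonal offsets row by row (base = r*(r+1)//2 + j, stopping at the
-- array end) instead of scanning all flat indices and decoding each candidate with A's
-- subtraction loop; same visit order, no decode helper (objective: alternative).

-- ===== PORT A =====
-- while pos >= i: pos -= i; i += 1  — fuel-bounded loop; fuel pos.toNat + 2 always suffices (proved below)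
def pti_loop : Nat → Int → Int → Int × Int
  | 0, pos, i => (i - 1, pos)
  | fuel+1, pos, i => if i ≤ pos then pti_loop fuel (pos - i) (i + 1) else (i - 1, pos)

def pos_to_indices (pos : Int) : Int × Int := pti_loop (pos.toNat + 2) pos 0

def stepA (v : List Int) (s : Int × Int × Int) (i : Int) : Int × Int × Int :=
  match PySem.List.pyGet? v i with
  | none => s  -- IndexError; unreachable: i < len(v)
  | some x =>
    if |x| > s.1 then
      let pij := pos_to_indices i
      if pij.1 ≠ pij.2 then (|x|, pij.1, pij.2) else s
    else s

def get_pos_for_max (vector_matrix : List Int) (size_matrix : Int) : List Int :=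
  match PySem.List.pyGet? vector_matrix 1 with
  | none => []  -- IndexError on vector_matrix[1]; excluded by Pre_
  | some x0 =>
    let s := (PySem.List.pyRange 3 (vector_matrix.length : Int) 1).foldl (stepA vector_matrix) (|x0|, 1, 0)
    [s.2.1, s.2.2]

-- ===== PORT B =====
-- r*(r+1)//2 >= r for every integer r, so the while-loop counter stays below L (used for termination)
theorem bloop_term (r L : Int) (h : PySem.Int.floordiv (r * (r + 1)) 2 < L) : r < L := by
  have hrr : 0 ≤ r * (r - 1) := by
    rcases lt_or_ge r 1 with hc | hc
    · have h := mul_nonneg (show (0:Int) ≤ -r by omega) (show (0:Int) ≤ -(r-1) by omega)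
      nlinarith [h]
    · exact mul_nonneg (by omega) (by omega)
  have h0 : r * 2 ≤ r * (r + 1) := by nlinarith
  have h1 : r ≤ PySem.Int.floordiv (r * (r + 1)) 2 :=
    (PySem.Int.le_floordiv_iff_mul_le (by norm_num)).mpr h0
  omega

def stepBInner (v : List Int) (r base : Int) (s : Int × Int × Int) (j : Int) : Int × Int × Int :=
  match PySem.List.pyGet? v (base + j) with
  | none => s  -- unreachable: 0 ≤ base + j < len(v)
  | some x => if |x| > s.1 then (|x|, r, j) else s

def bloop (v : List Int) (L r : Int) (s : Int × Int × Int) : Int × Int × Int :=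
  if h : PySem.Int.floordiv (r * (r + 1)) 2 < L then
    bloop v L (r + 1)
      ((PySem.List.pyRange 0 (min r (L - PySem.Int.floordiv (r * (r + 1)) 2)) 1).foldl
        (stepBInner v r (PySem.Int.floordiv (r * (r + 1)) 2)) s)
  else s
termination_by (L - r).toNat
decreasing_by
  have := bloop_term r L h
  omega

def get_pos_for_max_alt (vector_matrix : List Int) (size_matrix : Int) : List Int :=
  match PySem.List.pyGet? vector_matrix 1 with
  | none => []  -- IndexError on vector_matrix[1]; Pre_ excludes
  | some x0 =>
    let L : Int := (vector_matrix.length : Int)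
    let s := bloop vector_matrix L 1 (|x0|, 1, 0)
    [s.2.1, s.2.2]

-- ===== PRECONDITION & SPEC =====
-- Pre_ excludes exactly the vectors of length < 2, on which A raises IndexError at vector_matrix[1].
def Pre_get_pos_for_max (vector_matrix : List Int) (size_matrix : Int) : Prop :=
  2 ≤ vector_matrix.length
instance (vector_matrix : List Int) (size_matrix : Int) : Decidable (Pre_get_pos_for_max vector_matrix size_matrix) := by unfold Pre_get_pos_for_max; infer_instance

def pvWitness_get_pos_for_max : List Int × Int := ([4, -7, 2, 9, -1, 3], 3)

def Spec_get_pos_for_max (vector_matrix : List Int) (size_matrix : Int) (out : List Int) : Prop := out = get_pos_for_max_alt vector_matrix size_matrix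
instance (vector_matrix : List Int) (size_matrix : Int) (out : List Int) : Decidable (Spec_get_pos_for_max vector_matrix size_matrix out) := by unfold Spec_get_pos_for_max; infer_instance

-- ===== CLAIM (what is proved, stated in full; the proofs are below) =====
def Claim_equal_get_pos_for_max : Prop := ∀ (vector_matrix : List Int) (size_matrix : Int), Dom_get_pos_for_max vector_matrix size_matrix → Pre_get_pos_for_max vector_matrix size_matrix → Spec_get_pos_for_max vector_matrix size_matrix (get_pos_for_max vector_matrix size_matrix)

-- ===== LEMMAS AND PROOFS =====

-- triangular numbers: T r = 0 + 1 + … + r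
def T : Nat → Nat
  | 0 => 0
  | r+1 => T r + (r+1)

theorem two_T (r : Nat) : 2 * T r = r * (r + 1) := by
  induction r with
  | zero => rfl
  | succ r ih => show 2 * (T r + (r+1)) = _; rw [Nat.mul_add, ih]; ring

theorem T_ge (r : Nat) : r ≤ T r := by
  induction r with
  | zero => exact Nat.le_refl 0
  | succ r ih => show r + 1 ≤ T r + (r+1); omega

theorem T_le_T {a b : Nat} (h : a ≤ b) : T a ≤ T b := by
  induction b with
  | zero => interval_cases a; exact Nat.le_refl 0
  | succ b ih =>
    rcases Nat.lt_or_ge a (b+1) with h' | h'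
    · have := ih (by omega); show T a ≤ T b + (b+1); omega
    · have : a = b + 1 := by omega
      subst this; exact Nat.le_refl _

theorem T_gt {r : Nat} (h : 2 ≤ r) : r < T r := by
  have h2 := two_T r
  have h3 : r * 3 ≤ r * (r + 1) := Nat.mul_le_mul_left r (by omega)
  omega

-- decodeN m = (row, col) of flat index m in the packed lower triangle
def decodeN : Nat → Nat × Nat
  | 0 => (0, 0)
  | m+1 => let p := decodeN m; if p.2 < p.1 then (p.1, p.2+1) else (p.1+1, 0)

theorem decodeN_spec (m : Nat) : (decodeN m).2 ≤ (decodeN m).1 ∧ m = T (decodeN m).1 + (decodeN m).2 := by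
  induction m with
  | zero => exact ⟨Nat.le_refl 0, rfl⟩
  | succ m ih =>
    show ((let p := decodeN m; if p.2 < p.1 then (p.1, p.2+1) else (p.1+1, 0)).2 ≤ _) ∧ _
    obtain ⟨h1, h2⟩ := ih
    by_cases hlt : (decodeN m).2 < (decodeN m).1
    · simp only [decodeN, if_pos hlt]
      exact ⟨by omega, by omega⟩
    · have hEq : (decodeN m).2 = (decodeN m).1 := by omega
      simp only [decodeN, if_neg hlt]
      refine ⟨Nat.zero_le _, ?_⟩
      show m + 1 = T ((decodeN m).1 + 1) + 0
      show m + 1 = T (decodeN m).1 + ((decodeN m).1 + 1) + 0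
      omega

theorem pti_run : ∀ (d k r j : Nat), k + d = r + 1 → j ≤ r → ∀ fuel, d + 1 ≤ fuel →
    pti_loop fuel ((T r + j : Nat) - (T k : Nat) + (k : Int)) k = ((r : Int), (j : Int)) := by
  intro d
  induction d with
  | zero =>
    intro k r j hk hj fuel hf
    match fuel, hf with
    | f+1, _ =>
      have hk' : k = r + 1 := by omega
      subst hk'
      have hT : T (r + 1) = T r + (r + 1) := rfl
      have hp : ((T r + j : Nat) : Int) - ((T (r+1) : Nat) : Int) + ((r+1 : Nat) : Int) = (j : Int) := by
        rw [hT]; push_cast; ring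
      rw [hp]
      show (if ((r+1 : Nat) : Int) ≤ (j : Int) then _ else _) = _
      rw [if_neg (by push_cast; omega)]
      have : ((r+1 : Nat) : Int) - 1 = (r : Int) := by push_cast; ring
      rw [this]
  | succ d ih =>
    intro k r j hk hj fuel hf
    match fuel, hf with
    | f+1, hf =>
      have hkr : k ≤ r := by omega
      have hTk : T k ≤ T r := T_le_T hkr
      show (if (k : Int) ≤ _ then _ else _) = _
      rw [if_pos (by push_cast; omega)]
      have hT : T (k + 1) = T k + (k + 1) := rfl
      have hstate : ((T r + j : Nat) : Int) - ((T k : Nat) : Int) + (k : Int) - (k : Int)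
          = ((T r + j : Nat) : Int) - ((T (k+1) : Nat) : Int) + ((k+1 : Nat) : Int) := by
        rw [hT]; push_cast; ring
      have hknext : (k : Int) + 1 = ((k+1 : Nat) : Int) := by push_cast; ring
      rw [hstate, hknext]
      exact ih (k+1) r j (by omega) hj f (by omega)

theorem decode_eval (r j : Nat) (h : j ≤ r) :
    pos_to_indices ((T r + j : Nat) : Int) = ((r : Int), (j : Int)) := by
  unfold pos_to_indices
  have h0 : (((T r + j : Nat) : Int)).toNat = T r + j := Int.toNat_natCast _
  rw [h0]
  have hstate : ((T r + j : Nat) : Int) = ((T r + j : Nat) : Int) - ((T 0 : Nat) : Int) + ((0 : Nat) : Int) := by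
    show _ = _ - ((0:Nat):Int) + _; push_cast; ring
  rw [hstate]
  exact pti_run (r+1) 0 r j (by omega) h (T r + j + 2) (by have := T_ge r; omega)

theorem foldl_skip {α β : Type} (l : List β) (f : α → β → α) (h : ∀ a x, x ∈ l → f a x = a) :
    ∀ s : α, l.foldl f s = s := by
  induction l with
  | nil => intro s; rfl
  | cons y l ih =>
    intro s
    rw [List.foldl_cons, h s y (List.mem_cons_self), ih (fun a x hx => h a x (List.mem_cons_of_mem y hx))]

theorem base_eq (k : Nat) : PySem.Int.floordiv ((k:Int) * ((k:Int)+1)) 2 = ((T k : Nat) : Int) := by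
  have h1 : (k:Int) * ((k:Int)+1) = ((k * (k+1) : Nat) : Int) := by push_cast; ring
  have h2 : (2 : Int) = ((2 : Nat) : Int) := rfl
  rw [h1, h2, PySem.Int.floordiv_natCast]
  have := two_T k
  congr 1
  omega

-- A's guarded nested-loop row step, the common reference shape for both ports' loops
def stepBRow (v : List Int) (L : Int) (s : Int × Int × Int) (r : Int) : Int × Int × Int :=
  let base := PySem.Int.floordiv (r * (r + 1)) 2
  (PySem.List.pyRange 0 r 1).foldl (fun s j =>
    let pos := base + j
    if pos < L then
      match PySem.List.pyGet? v pos with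
      | none => s
      | some x => if |x| > s.1 then (|x|, r, j) else s
    else s) s

theorem stepBRow_eq (v : List Int) (L : Int) (rn : Nat) (s : Int × Int × Int) :
    stepBRow v L s (rn : Int) = (PySem.List.pyRange 0 (rn : Int) 1).foldl (fun s j =>
      if ((T rn : Nat) : Int) + j < L then
        match PySem.List.pyGet? v (((T rn : Nat) : Int) + j) with
        | none => s
        | some x => if |x| > s.1 then (|x|, (rn : Int), j) else s
      else s) s := by
  unfold stepBRow
  rw [base_eq]

theorem row_id (v : List Int) (L : Int) (rn : Nat) (h : L ≤ ((T rn : Nat) : Int)) (s : Int × Int × Int) :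
    stepBRow v L s (rn : Int) = s := by
  rw [stepBRow_eq]
  apply foldl_skip
  intro a j hj
  have hmem := (PySem.List.mem_pyRange_one).mp hj
  rw [if_neg (by omega)]

theorem row_guard_congr (v : List Int) (L L' : Int) (rn : Nat)
    (h : ∀ j : Int, 0 ≤ j → j < (rn : Int) → (((T rn : Nat) : Int) + j < L ↔ ((T rn : Nat) : Int) + j < L'))
    (s : Int × Int × Int) : stepBRow v L s (rn : Int) = stepBRow v L' s (rn : Int) := by
  rw [stepBRow_eq, stepBRow_eq]
  apply PySem.List.foldl_congr_mem
  intro acc j hj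
  have hmem := (PySem.List.mem_pyRange_one).mp hj
  by_cases hlt : ((T rn : Nat) : Int) + j < L
  · rw [if_pos hlt, if_pos ((h j hmem.1 hmem.2).mp hlt)]
  · rw [if_neg hlt, if_neg (fun hc => hlt ((h j hmem.1 hmem.2).mpr hc))]

theorem row_bump (v : List Int) (m r0 j0 : Nat) (x : Int)
    (hx : PySem.List.pyGet? v (m : Int) = some x) (hm : m = T r0 + j0) (hj : j0 < r0)
    (s : Int × Int × Int) :
    stepBRow v ((m : Int) + 1) s (r0 : Int)
      = (if |x| > (stepBRow v (m : Int) s (r0 : Int)).1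
          then (|x|, (r0 : Int), (j0 : Int)) else stepBRow v (m : Int) s (r0 : Int)) := by
  rw [stepBRow_eq, stepBRow_eq]
  have hsplit : PySem.List.pyRange 0 (r0 : Int) 1
      = PySem.List.pyRange 0 (j0 : Int) 1 ++ (j0 : Int) :: PySem.List.pyRange ((j0 : Int) + 1) (r0 : Int) 1 := by
    have h1 : PySem.List.pyRange (j0 : Int) (r0 : Int) 1
        = (j0 : Int) :: PySem.List.pyRange ((j0 : Int) + 1) (r0 : Int) 1 :=
      PySem.List.pyRange_one_cons (by exact_mod_cast hj)
    rw [PySem.List.pyRange_one_append 0 (j0 : Int) (r0 : Int) (by omega) (by exact_mod_cast Nat.le_of_lt hj), h1]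
  rw [hsplit]
  simp only [List.foldl_append, List.foldl_cons]
  -- head: both guards agree for j < j0 (pos < m)
  have hhead : ∀ (L L' : Int), L = (m:Int) → L' = (m:Int) + 1 →
      (PySem.List.pyRange 0 (j0 : Int) 1).foldl (fun s j =>
        if ((T r0 : Nat) : Int) + j < L' then
          match PySem.List.pyGet? v (((T r0 : Nat) : Int) + j) with
          | none => s
          | some x => if |x| > s.1 then (|x|, (r0 : Int), j) else s
        else s) s
      = (PySem.List.pyRange 0 (j0 : Int) 1).foldl (fun s j =>
        if ((T r0 : Nat) : Int) + j < L then
          match PySem.List.pyGet? v (((T r0 : Nat) : Int) + j) with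
          | none => s
          | some x => if |x| > s.1 then (|x|, (r0 : Int), j) else s
        else s) s := by
    intro L L' hL hL'
    apply PySem.List.foldl_congr_mem
    intro acc j hjm
    have hmem := (PySem.List.mem_pyRange_one).mp hjm
    have hlt : ((T r0 : Nat) : Int) + j < (m : Int) := by
      have : (m : Int) = ((T r0 : Nat) : Int) + (j0 : Int) := by rw [hm]; push_cast; ring
      omega
    rw [if_pos (by omega), if_pos (by omega)]
  rw [hhead (m : Int) ((m:Int)+1) rfl rfl]
  -- tail: identity under both guards (pos ≥ m + 1)
  have htail : ∀ (L : Int), L ≤ (m : Int) + 1 → ∀ t : Int × Int × Int,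
      (PySem.List.pyRange ((j0 : Int) + 1) (r0 : Int) 1).foldl (fun s j =>
        if ((T r0 : Nat) : Int) + j < L then
          match PySem.List.pyGet? v (((T r0 : Nat) : Int) + j) with
          | none => s
          | some x => if |x| > s.1 then (|x|, (r0 : Int), j) else s
        else s) t = t := by
    intro L hL
    apply foldl_skip
    intro a j hjm
    have hmem := (PySem.List.mem_pyRange_one).mp hjm
    have : ((T r0 : Nat) : Int) + (j0 : Int) = (m : Int) := by rw [hm]; push_cast; ring
    rw [if_neg (by omega)]
  rw [htail ((m:Int)+1) (by omega), htail (m:Int) (by omega)]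
  -- the step at j0 itself
  have hposm : ((T r0 : Nat) : Int) + (j0 : Int) = (m : Int) := by rw [hm]; push_cast; ring
  rw [hposm]
  rw [if_pos (show (m:Int) < (m:Int) + 1 by omega), if_neg (show ¬((m:Int) < (m:Int)) by omega), hx]

theorem stepA_eval (v : List Int) (m r0 j0 : Nat) (x : Int)
    (hx : PySem.List.pyGet? v (m : Int) = some x) (hm : m = T r0 + j0) (hj : j0 ≤ r0)
    (s : Int × Int × Int) :
    stepA v s (m : Int)
      = (if j0 < r0 then (if |x| > s.1 then (|x|, (r0 : Int), (j0 : Int)) else s) else s) := by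
  unfold stepA
  have hdec : pos_to_indices (m : Int) = ((r0 : Int), (j0 : Int)) := by
    rw [hm]; exact_mod_cast decode_eval r0 j0 hj
  simp only [hx, hdec]
  by_cases hlt : j0 < r0
  · rw [if_pos hlt]
    split_ifs with h1 h2
    · rfl
    · exfalso
      have hc : (r0 : Int) = (j0 : Int) := not_ne_iff.mp h2
      omega
    · rfl
  · rw [if_neg hlt]
    have he : j0 = r0 := by omega
    subst he
    split_ifs with h1 h2
    · exfalso; exact h2 rfl
    · rfl
    · rfl

theorem main_fold (v : List Int) : ∀ (m : Nat), m ≤ v.length → ∀ s,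
    (PySem.List.pyRange 3 (m : Int) 1).foldl (stepA v) s
      = (PySem.List.pyRange 2 (m : Int) 1).foldl (stepBRow v (m : Int)) s := by
  intro m
  induction m with
  | zero =>
    intro _ s
    rw [PySem.List.pyRange_one_eq_nil (by omega), PySem.List.pyRange_one_eq_nil (by omega)]
    rfl
  | succ m ih =>
    intro hlen s
    by_cases hm3 : 3 ≤ m
    · -- inductive step: append the new index m to both ranges
      have hcast : ((m + 1 : Nat) : Int) = (m : Int) + 1 := by push_cast; ring
      rw [hcast,
          PySem.List.pyRange_one_succ_right (a := 3) (by exact_mod_cast hm3),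
          PySem.List.pyRange_one_succ_right (a := 2) (by exact_mod_cast (by omega : 2 ≤ m)),
          List.foldl_append, List.foldl_append]
      simp only [List.foldl_cons, List.foldl_nil]
      -- the new outer row m contributes nothing: its first offset T m ≥ m + 1
      have hrowm : ∀ t, stepBRow v ((m:Int)+1) t (m : Int) = t := by
        intro t
        apply row_id
        have := T_gt (r := m) (by omega)
        omega
      rw [hrowm]
      -- decompose m = T r0 + j0
      obtain ⟨hj, hmeq⟩ := decodeN_spec m
      set r0 := (decodeN m).1 with hr0
      set j0 := (decodeN m).2 with hj0
      have hr02 : 2 ≤ r0 := by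
        by_contra hc
        have h1 : T r0 ≤ T 1 := T_le_T (by omega)
        have : T 1 = 1 := rfl
        omega
      have hx : ∃ x, PySem.List.pyGet? v (m : Int) = some x := by
        have : PySem.List.pyGet? v ((m : Nat) : Int) = v[(m : Nat)]? := PySem.List.pyGet?_natCast v m
        rw [this]
        exact ⟨v[m], List.getElem?_eq_getElem (by omega)⟩
      obtain ⟨x, hx⟩ := hx
      by_cases hdiag : j0 < r0
      · -- off-diagonal: both sides perform the comparison at packed index m
        have hr0m : r0 < m := by
          have := T_gt (r := r0) hr02
          omega
        -- split B's rows at r0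
        have hsplitB : PySem.List.pyRange 2 (m : Int) 1
            = PySem.List.pyRange 2 (r0 : Int) 1 ++ (r0 : Int) :: PySem.List.pyRange ((r0 : Int) + 1) (m : Int) 1 := by
          have h1 : PySem.List.pyRange (r0 : Int) (m : Int) 1
              = (r0 : Int) :: PySem.List.pyRange ((r0 : Int) + 1) (m : Int) 1 :=
            PySem.List.pyRange_one_cons (by exact_mod_cast hr0m)
          rw [PySem.List.pyRange_one_append 2 (r0 : Int) (m : Int) (by exact_mod_cast hr02) (by exact_mod_cast Nat.le_of_lt hr0m), h1]
        -- tail rows (r > r0) are identity under any guard ≤ m+1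
        have htailid : ∀ (L : Int), L ≤ (m:Int) + 1 → ∀ t,
            (PySem.List.pyRange ((r0 : Int) + 1) (m : Int) 1).foldl (stepBRow v L) t = t := by
          intro L hL
          apply foldl_skip
          intro a r hr
          have hmem := (PySem.List.mem_pyRange_one).mp hr
          have hrn : r = ((r.toNat : Nat) : Int) := by omega
          rw [hrn]
          apply row_id
          have h1 : T (r0 + 1) ≤ T r.toNat := T_le_T (by omega)
          have h2 : T (r0 + 1) = T r0 + (r0 + 1) := rfl
          omega
        -- head rows (r < r0) do not see index m: guards m and m+1 agree
        have hheadcongr : ∀ t,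
            (PySem.List.pyRange 2 (r0 : Int) 1).foldl (stepBRow v ((m:Int)+1)) t
              = (PySem.List.pyRange 2 (r0 : Int) 1).foldl (stepBRow v (m:Int)) t := by
          intro t
          apply PySem.List.foldl_congr_mem
          intro acc r hr
          have hmem := (PySem.List.mem_pyRange_one).mp hr
          have hrn : r = ((r.toNat : Nat) : Int) := by omega
          rw [hrn]
          apply row_guard_congr
          intro j hj0' hjr
          have h1 : T (r.toNat + 1) ≤ T r0 := T_le_T (by omega)
          have h2 : T (r.toNat + 1) = T r.toNat + (r.toNat + 1) := rfl
          constructor <;> intro <;> omega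
        rw [hsplitB]
        simp only [List.foldl_append, List.foldl_cons]
        rw [htailid ((m:Int)+1) (by omega), hheadcongr]
        rw [row_bump v m r0 j0 x hx hmeq hdiag]
        rw [stepA_eval v m r0 j0 x hx hmeq hj]
        rw [if_pos hdiag]
        have hBA := ih (by omega) s
        rw [hsplitB] at hBA
        simp only [List.foldl_append, List.foldl_cons] at hBA
        rw [htailid (m:Int) (by omega)] at hBA
        rw [hBA]
      · -- diagonal: index m is skipped by A and never generated by B
        have hde : j0 = r0 := by omega
        have hguardall : ∀ t,
            (PySem.List.pyRange 2 (m : Int) 1).foldl (stepBRow v ((m:Int)+1)) t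
              = (PySem.List.pyRange 2 (m : Int) 1).foldl (stepBRow v (m:Int)) t := by
          intro t
          apply PySem.List.foldl_congr_mem
          intro acc r hr
          have hmem := (PySem.List.mem_pyRange_one).mp hr
          have hrn : r = ((r.toNat : Nat) : Int) := by omega
          rw [hrn]
          apply row_guard_congr
          intro j hj0' hjr
          rcases Nat.lt_or_ge r0 r.toNat with hc | hc
          · have h1 : T (r0 + 1) ≤ T r.toNat := T_le_T (by omega)
            have h2 : T (r0 + 1) = T r0 + (r0 + 1) := rfl
            constructor <;> intro <;> omega
          · have h1 : T (r.toNat + 1) ≤ T (r0 + 1) := T_le_T (by omega)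
            have h2 : T (r.toNat + 1) = T r.toNat + (r.toNat + 1) := rfl
            have h3 : T (r0 + 1) = T r0 + (r0 + 1) := rfl
            constructor <;> intro <;> omega
        rw [hguardall]
        rw [stepA_eval v m r0 j0 x hx hmeq hj]
        rw [if_neg hdiag]
        exact ih (by omega) s
    · -- base: m + 1 ≤ 3
      interval_cases m
      · rw [PySem.List.pyRange_one_eq_nil (by norm_num), PySem.List.pyRange_one_eq_nil (by norm_num)]
        rfl
      · rw [PySem.List.pyRange_one_eq_nil (by norm_num), PySem.List.pyRange_one_eq_nil (by norm_num)]
        rfl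
      · -- m + 1 = 3 : A's range is empty, B's single row 2 starts at offset 3 ≥ 3
        rw [PySem.List.pyRange_one_eq_nil (by norm_num)]
        have h3 : ((3:Nat) : Int) = 3 := rfl
        rw [h3, PySem.List.pyRange_one_cons (by norm_num), PySem.List.pyRange_one_eq_nil (by norm_num)]
        simp only [List.foldl_cons, List.foldl_nil]
        have h2 : (2 : Int) = ((2:Nat) : Int) := rfl
        rw [h2]
        rw [row_id v 3 2 (by norm_num [T]) s]

theorem row1_init (v : List Int) (L : Int) (x0 : Int)
    (hx0 : PySem.List.pyGet? v 1 = some x0) (hL : 2 ≤ L) :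
    stepBRow v L (|x0|, 1, 0) 1 = (|x0|, 1, 0) := by
  have h1 : (1 : Int) = ((1:Nat) : Int) := rfl
  rw [h1, stepBRow_eq]
  have hr : PySem.List.pyRange 0 ((1:Nat) : Int) 1 = [0] := by
    have h0 : ((1:Nat) : Int) = 0 + 1 := by norm_num
    rw [h0, PySem.List.pyRange_one_singleton]
  rw [hr]
  simp only [List.foldl_cons, List.foldl_nil]
  have hT1 : ((T 1 : Nat) : Int) + 0 = 1 := rfl
  rw [hT1, if_pos (by omega), hx0]
  simp

theorem rowEq (v : List Int) (L : Int) (rn : Nat) (hT : ((T rn : Nat) : Int) < L)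
    (s : Int × Int × Int) :
    (PySem.List.pyRange 0 (min (rn : Int) (L - ((T rn : Nat) : Int))) 1).foldl
        (stepBInner v (rn : Int) ((T rn : Nat) : Int)) s
      = stepBRow v L s (rn : Int) := by
  rw [stepBRow_eq]
  have hmn0 : 0 ≤ min (rn : Int) (L - ((T rn : Nat) : Int)) := by omega
  have hmnr : min (rn : Int) (L - ((T rn : Nat) : Int)) ≤ (rn : Int) := by omega
  rw [PySem.List.pyRange_one_append 0 (min (rn : Int) (L - ((T rn : Nat) : Int))) (rn : Int) hmn0 hmnr,
      List.foldl_append]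
  rw [foldl_skip (PySem.List.pyRange (min (rn : Int) (L - ((T rn : Nat) : Int))) (rn : Int) 1) _
      (fun a j hj => by
        have hmem := (PySem.List.mem_pyRange_one).mp hj
        rw [if_neg (by omega)])]
  apply Eq.symm
  apply PySem.List.foldl_congr_mem
  intro acc j hj
  have hmem := (PySem.List.mem_pyRange_one).mp hj
  rw [if_pos (by omega)]
  rfl

theorem bloop_eq (v : List Int) (L : Int) : ∀ (k : Nat) (rn : Nat), (L - (rn : Int)).toNat = k →
    ∀ s, bloop v L (rn : Int) s = (PySem.List.pyRange (rn : Int) L 1).foldl (stepBRow v L) s := by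
  intro k
  induction k using Nat.strong_induction_on with
  | _ k ih =>
    intro rn hk s
    rw [bloop]
    have hb : PySem.Int.floordiv ((rn : Int) * ((rn : Int) + 1)) 2 = ((T rn : Nat) : Int) := base_eq rn
    by_cases hT : ((T rn : Nat) : Int) < L
    · rw [dif_pos (by rw [hb]; exact hT)]
      have hrnL : (rn : Int) < L := by
        have := T_ge rn
        omega
      simp only [hb]
      rw [rowEq v L rn hT s]
      have hcast : (rn : Int) + 1 = ((rn + 1 : Nat) : Int) := by push_cast; ring
      rw [hcast]
      rw [ih ((L - ((rn + 1 : Nat) : Int)).toNat) (by push_cast; omega) (rn + 1) rfl]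
      rw [PySem.List.pyRange_one_cons hrnL, List.foldl_cons, hcast]
    · rw [dif_neg (by rw [hb]; exact hT)]
      apply Eq.symm
      apply foldl_skip
      intro a r hr
      have hmem := (PySem.List.mem_pyRange_one).mp hr
      have hrn : r = ((r.toNat : Nat) : Int) := by omega
      rw [hrn]
      apply row_id
      have h1 : T rn ≤ T r.toNat := T_le_T (by omega)
      omega

theorem get_pos_spec' (v : List Int) (sm : Int) (h : 2 ≤ v.length) :
    get_pos_for_max v sm = get_pos_for_max_alt v sm := by
  have hx0 : PySem.List.pyGet? v 1 = some v[1] := by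
    have := PySem.List.pyGet?_ofNat v 1 (by omega)
    simpa using this
  unfold get_pos_for_max get_pos_for_max_alt
  simp only [hx0]
  have hbl : bloop v (v.length : Int) 1 (|v[1]|, 1, 0)
      = (PySem.List.pyRange 1 (v.length : Int) 1).foldl (stepBRow v (v.length : Int)) (|v[1]|, 1, 0) := by
    have := bloop_eq v (v.length : Int) (((v.length : Int) - ((1 : Nat) : Int)).toNat) 1 rfl (|v[1]|, 1, 0)
    simpa using this
  rw [hbl]
  have hsplit : PySem.List.pyRange 1 (v.length : Int) 1
      = 1 :: PySem.List.pyRange 2 (v.length : Int) 1 := by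
    have := PySem.List.pyRange_one_cons (a := 1) (b := (v.length : Int)) (by omega)
    simpa using this
  rw [hsplit]
  simp only [List.foldl_cons]
  simp only [row1_init v (v.length : Int) v[1] hx0 (by omega)]
  exact congrArg (fun t : Int × Int × Int => [t.2.1, t.2.2]) (main_fold v v.length (Nat.le_refl _) (|v[1]|, 1, 0))

-- ===== VERDICT (by name: the statement is the Claim_ definition above) =====
theorem get_pos_for_max_spec : Claim_equal_get_pos_for_max := by
  intro v sm _ hpre
  exact get_pos_spec' v sm hpre
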